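-- pv_equiv track=rewrite | github.com/Scherlac/felvi_games | src/felvi_games/progress_check.py | _current_correct_streak
-- ===== SOURCE A (Python) =====
-- def _current_correct_streak(seq: list[bool]) -> int:
--     cur = 0
--     for v in reversed(seq):
--         if v:
--             cur += 1
--         else:
--             break
--     return cur
-- ===== SOURCE B (Python) =====
-- def _current_correct_streak(seq: list[bool]) -> int:
--     cur = 0
--     for v in seq:
--         cur = cur + 1 if v else 0
--     return cur
-- ===== Notes on version B (the rewrite author's own statement) =====
-- stated objective: alternative
-- what changed: B replaces A's backward scan with early break by a single forward pass maintaining a reset-on-False running counter.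
import Mathlib
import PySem

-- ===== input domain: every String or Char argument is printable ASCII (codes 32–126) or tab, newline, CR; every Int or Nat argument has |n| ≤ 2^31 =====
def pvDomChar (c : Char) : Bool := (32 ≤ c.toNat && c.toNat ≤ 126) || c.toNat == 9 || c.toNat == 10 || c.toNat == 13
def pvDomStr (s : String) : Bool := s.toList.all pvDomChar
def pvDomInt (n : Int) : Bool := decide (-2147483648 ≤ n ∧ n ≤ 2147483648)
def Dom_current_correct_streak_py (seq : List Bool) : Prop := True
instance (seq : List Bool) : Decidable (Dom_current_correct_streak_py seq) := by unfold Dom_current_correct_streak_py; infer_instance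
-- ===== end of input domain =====

-- ===== PORT A =====
-- A iterates over reversed(seq), counting Trues until the first False (break)
def pvAGo (l : List Bool) (cur : Int) : Int :=
  match l with
  | [] => cur
  | v :: rest => if v then pvAGo rest (cur + 1) else cur

def current_correct_streak_py (seq : List Bool) : Int :=
  pvAGo seq.reverse 0

-- ===== PORT B =====
-- B: forward pass, counter resets to 0 on False
def current_correct_streak_py_alt (seq : List Bool) : Int :=
  seq.foldl (fun cur v => if v then cur + 1 else 0) 0

-- ===== PRECONDITION & SPEC =====
def Spec_current_correct_streak_py (seq : List Bool) (out : Int) : Prop := out = current_correct_streak_py_alt seq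
instance (seq : List Bool) (out : Int) : Decidable (Spec_current_correct_streak_py seq out) := by unfold Spec_current_correct_streak_py; infer_instance

-- ===== CLAIM (what is proved, stated in full; the proofs are below) =====
def Claim_equal_current_correct_streak_py : Prop := ∀ (seq : List Bool), Dom_current_correct_streak_py seq → Spec_current_correct_streak_py seq (current_correct_streak_py seq)

-- ===== LEMMAS AND PROOFS =====

-- ===== VERDICT (by name: the statement is the Claim_ definition above) =====
theorem pvAGo_shift (l : List Bool) (c : Int) : pvAGo l c = c + pvAGo l 0 := by
  induction l generalizing c with
  | nil => simp [pvAGo]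
  | cons v rest ih =>
    by_cases hv : v = true <;> simp [pvAGo, hv]
    rw [ih (c+1), ih 1]; ring

theorem pv_main (l : List Bool) :
    l.foldl (fun cur v => if v then cur + 1 else 0) 0 = pvAGo l.reverse 0 := by
  induction l using List.reverseRecOn with
  | nil => simp [pvAGo]
  | append_singleton l v ih =>
    rw [List.foldl_append, List.reverse_append]
    by_cases hv : v = true <;> simp [pvAGo, hv, ih]
    rw [pvAGo_shift _ 1]; ring

theorem current_correct_streak_py_spec : Claim_equal_current_correct_streak_py := by
  intro seq _
  unfold Spec_current_correct_streak_py current_correct_streak_py current_correct_streak_py_alt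
  exact (pv_main seq).symm
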